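-- pv_equiv track=rewrite | github.com/63847051/redesigned-carnival | projects/financedatabase-integration/scripts/advanced_filter.py | _match_search
-- ===== SOURCE A (Python) =====
-- from typing import List, Dict, Any, Optional
--
-- def _match_search(item: Dict[str, Any], query: str, fields: Optional[List[str]]) -> bool:
--     """检查是否匹配搜索查询"""
--     if not fields:
--         # 搜索所有文本字段
--         for value in item.values():
--             if isinstance(value, str) and query in value.lower():
--                 return True
--         return False
--
--     # 搜索指定字段
--     for field in fields:
--         if field in item:
--             value = item[field]
--             if isinstance(value, str) and query in value.lower():
--                 return True
--     return False
-- ===== SOURCE B (Python) =====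
-- from typing import List, Dict, Any, Optional
--
-- def _match_search(item: Dict[str, Any], query: str, fields: Optional[List[str]]) -> bool:
--     """检查是否匹配搜索查询"""
--     wanted = set(fields) if fields else None
--     for key, value in item.items():
--         if (wanted is None or key in wanted) and isinstance(value, str) and query in value.lower():
--             return True
--     return False
-- ===== Notes on version B (the rewrite author's own statement) =====
-- stated objective: alternative
-- what changed: B inverts the traversal: instead of iterating the fields list with a dict lookup per field (A's second loop) it makes one pass over the dict's items, filtering keys against a precomputed set of fields; both branches become the same single scan of the item.
import Mathlib
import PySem

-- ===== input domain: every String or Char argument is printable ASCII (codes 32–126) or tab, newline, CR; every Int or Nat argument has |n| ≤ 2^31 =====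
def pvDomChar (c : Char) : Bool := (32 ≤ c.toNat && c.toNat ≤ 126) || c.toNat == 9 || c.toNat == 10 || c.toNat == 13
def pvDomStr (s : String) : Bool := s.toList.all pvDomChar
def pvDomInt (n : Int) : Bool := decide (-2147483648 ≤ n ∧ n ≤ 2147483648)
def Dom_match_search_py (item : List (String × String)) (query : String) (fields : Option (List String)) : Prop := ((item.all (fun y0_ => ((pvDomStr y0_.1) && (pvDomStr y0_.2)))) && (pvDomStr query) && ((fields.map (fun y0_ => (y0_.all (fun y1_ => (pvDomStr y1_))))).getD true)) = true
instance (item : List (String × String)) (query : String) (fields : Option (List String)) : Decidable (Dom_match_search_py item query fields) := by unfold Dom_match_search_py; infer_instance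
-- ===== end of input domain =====

-- B inverts A's traversal: one pass over the dict's items filtered against a precomputed set of fields,
-- instead of A's two separate loops (over values, or over fields with a dict lookup each) — objective: alternative.

-- ===== PORT A =====
-- 'for value in item.values(): if isinstance(value, str) and query in value.lower(): return True / return False'
-- (values are always str under the type convention, so isinstance(value, str) is True)
def pvLoopValsA (q : String) : List String → Bool
  | [] => false
  | v :: vs => if PySem.Str.isIn q (PySem.Str.lower v) then true else pvLoopValsA q vs

-- 'for field in fields: if field in item: value = item[field]; if … : return True / return False'
-- dict membership/lookup on the assoc list = first match
def pvLoopFieldsA (item : List (String × String)) (q : String) : List String → Bool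
  | [] => false
  | f :: fs =>
    match item.find? (fun kv => kv.1 == f) with
    | some kv => if PySem.Str.isIn q (PySem.Str.lower kv.2) then true else pvLoopFieldsA item q fs
    | none => pvLoopFieldsA item q fs

def match_search_py (item : List (String × String)) (query : String) (fields : Option (List String)) : Bool :=
  match fields with
  | none => pvLoopValsA query (item.map Prod.snd)          -- 'not fields' : None
  | some [] => pvLoopValsA query (item.map Prod.snd)       -- 'not fields' : empty list
  | some fs => pvLoopFieldsA item query fs

-- ===== PORT B =====
-- 'wanted = set(fields) if fields else None'
def pvWantedB (fields : Option (List String)) : Option (PySem.Set String) :=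
  match fields with
  | none => none
  | some fs =>
    match fs with
    | [] => none
    | f :: rest => some (PySem.Set.ofList (f :: rest))

-- 'for key, value in item.items(): if (wanted is None or key in wanted) and … : return True / return False'
def pvScanB (q : String) (wanted : Option (PySem.Set String)) : List (String × String) → Bool
  | [] => false
  | kv :: rest =>
    if (match wanted with
        | none => true
        | some s => PySem.Set.contains s kv.1) && PySem.Str.isIn q (PySem.Str.lower kv.2)
    then true
    else pvScanB q wanted rest

def match_search_py_alt (item : List (String × String)) (query : String) (fields : Option (List String)) : Bool :=
  pvScanB query (pvWantedB fields) item

-- ===== PRECONDITION & SPEC =====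
-- Pre_: item is the association list of a Python dict, so its keys are pairwise distinct;
-- this excludes no input the Python A accepts (a dict cannot have duplicate keys).
def Pre_match_search_py (item : List (String × String)) (query : String) (fields : Option (List String)) : Prop :=
  (item.map Prod.fst).Nodup
instance (item : List (String × String)) (query : String) (fields : Option (List String)) : Decidable (Pre_match_search_py item query fields) := by unfold Pre_match_search_py; infer_instance

def pvWitness_match_search_py : (List (String × String)) × String × Option (List String) :=
  ([("name", "Apple Inc"), ("sector", "Tech")], "apple", some ["name"])

def Spec_match_search_py (item : List (String × String)) (query : String) (fields : Option (List String)) (out : Bool) : Prop := out = match_search_py_alt item query fields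
instance (item : List (String × String)) (query : String) (fields : Option (List String)) (out : Bool) : Decidable (Spec_match_search_py item query fields out) := by unfold Spec_match_search_py; infer_instance

-- ===== CLAIM =====
def Claim_equal_match_search_py : Prop := ∀ (item : List (String × String)) (query : String) (fields : Option (List String)), Dom_match_search_py item query fields → Pre_match_search_py item query fields → Spec_match_search_py item query fields (match_search_py item query fields)

-- ===== LEMMAS AND PROOFS =====

-- B's scan loop is List.any of its test.
theorem pvScanB_eq_any (q : String) (wanted : Option (PySem.Set String)) (item : List (String × String)) :
    pvScanB q wanted item
      = item.any (fun kv =>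
          (match wanted with
           | none => true
           | some s => PySem.Set.contains s kv.1) && PySem.Str.isIn q (PySem.Str.lower kv.2)) := by
  induction item with
  | nil => rfl
  | cons kv rest ih =>
    rcases h : ((match wanted with
        | none => true
        | some s => PySem.Set.contains s kv.1) && PySem.Str.isIn q (PySem.Str.lower kv.2)) <;>
      simp [pvScanB, h, ih]

-- A's value loop equals B's scan with no field filter.
theorem loopValsA_eq_scan_none (q : String) (item : List (String × String)) :
    pvLoopValsA q (item.map Prod.snd) = pvScanB q none item := by
  induction item with
  | nil => rfl
  | cons kv rest ih =>
    rcases h : PySem.Str.isIn q (PySem.Str.lower kv.2) <;>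
      simp [pvLoopValsA, pvScanB, h, ih]

-- A's fields loop is List.any over fields of the lookup test.
theorem loopFieldsA_eq_any (item : List (String × String)) (q : String) (fs : List String) :
    pvLoopFieldsA item q fs
      = fs.any (fun f =>
          match item.find? (fun kv => kv.1 == f) with
          | some kv => PySem.Str.isIn q (PySem.Str.lower kv.2)
          | none => false) := by
  induction fs with
  | nil => rfl
  | cons f fs ih =>
    cases hfind : item.find? (fun kv => kv.1 == f) with
    | none => simp [pvLoopFieldsA, hfind, ih]
    | some kv =>
      by_cases hm : PySem.Str.isIn q (PySem.Str.lower kv.2) <;>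
        simp [pvLoopFieldsA, hfind, hm, ih]

-- With distinct keys, a present pair IS what find? returns for its key.
theorem find?_of_mem_nodup (item : List (String × String)) (kv : String × String)
    (hnd : (item.map Prod.fst).Nodup) (hmem : kv ∈ item) :
    item.find? (fun x => x.1 == kv.1) = some kv := by
  induction item with
  | nil => cases hmem
  | cons hd rest ih =>
    rw [List.map_cons, List.nodup_cons] at hnd
    obtain ⟨hnot, hnd'⟩ := hnd
    rcases List.mem_cons.mp hmem with h | h
    · subst h; simp [List.find?]
    · have hne : (hd.1 == kv.1) = false := by
        simp only [beq_eq_false_iff_ne, ne_eq]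
        intro he
        exact hnot (he ▸ List.mem_map_of_mem h)
      simp [List.find?, hne, ih hnd' h]

-- With distinct keys, scanning the fields with lookups equals scanning the item filtered by field membership.
theorem any_fields_eq_any_item (item : List (String × String)) (q : String) (fs : List String)
    (hnd : (item.map Prod.fst).Nodup) :
    (fs.any (fun f =>
        match item.find? (fun kv => kv.1 == f) with
        | some kv => PySem.Str.isIn q (PySem.Str.lower kv.2)
        | none => false))
    = item.any (fun kv => PySem.Set.contains (PySem.Set.ofList fs) kv.1
        && PySem.Str.isIn q (PySem.Str.lower kv.2)) := by
  rw [Bool.eq_iff_iff]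
  simp only [List.any_eq_true, Bool.and_eq_true]
  constructor
  · rintro ⟨f, hf, hp⟩
    cases hfind : item.find? (fun kv => kv.1 == f) with
    | none => rw [hfind] at hp; cases hp
    | some kv =>
      rw [hfind] at hp
      have hkey : kv.1 = f := by simpa using List.find?_some hfind
      refine ⟨kv, List.mem_of_find?_eq_some hfind, ?_, hp⟩
      have : kv.1 ∈ PySem.Set.ofList fs := (PySem.Set.mem_ofList _ _).mpr (hkey ▸ hf)
      simpa [PySem.Set.contains] using this
  · rintro ⟨kv, hkv, hcont, hm⟩
    have hf : kv.1 ∈ fs := by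
      have : kv.1 ∈ PySem.Set.ofList fs := by
        simpa [PySem.Set.contains] using hcont
      exact (PySem.Set.mem_ofList _ _).mp this
    refine ⟨kv.1, hf, ?_⟩
    rw [find?_of_mem_nodup item kv hnd hkv]
    exact hm

-- ===== VERDICT =====
theorem match_search_py_spec : Claim_equal_match_search_py := by
  intro item query fields _ hpre
  unfold Spec_match_search_py match_search_py match_search_py_alt pvWantedB
  match fields with
  | none => exact loopValsA_eq_scan_none query item
  | some [] => exact loopValsA_eq_scan_none query item
  | some (f :: fs) =>
    show pvLoopFieldsA item query (f :: fs)
        = pvScanB query (some (PySem.Set.ofList (f :: fs))) item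
    rw [loopFieldsA_eq_any, any_fields_eq_any_item item query (f :: fs) hpre,
        pvScanB_eq_any]
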